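-- pv_equiv track=rewrite | github.com/trpzn/university | redes/tarea1/hamming.py | trimParityRec
-- ===== SOURCE A (Python) =====
-- def trimParityRec(binaryList,jumpread):
--     if(len(binaryList) == 0): return []
--     binaryListA = binaryList[:jumpread]
--     binaryListB = binaryList[jumpread*2:]
--     returnList = []
--     for data in binaryListA:
--                    returnList.append(data)
--     return returnList + trimParityRec(binaryListB,jumpread)
-- ===== SOURCE B (Python) =====
-- def trimParityRec(binaryList, jumpread):
--     period = 2 * jumpread
--     return [data for i, data in enumerate(binaryList) if i % period < jumpread]
-- ===== Notes on version B (the rewrite author's own statement) =====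
-- stated objective: alternative
-- what changed: Replaces the recursive slice-and-concatenate with a single linear pass that keeps element i exactly when i mod 2*jumpread < jumpread; it trades A's slicing for one modulus test per element.
import Mathlib
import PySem

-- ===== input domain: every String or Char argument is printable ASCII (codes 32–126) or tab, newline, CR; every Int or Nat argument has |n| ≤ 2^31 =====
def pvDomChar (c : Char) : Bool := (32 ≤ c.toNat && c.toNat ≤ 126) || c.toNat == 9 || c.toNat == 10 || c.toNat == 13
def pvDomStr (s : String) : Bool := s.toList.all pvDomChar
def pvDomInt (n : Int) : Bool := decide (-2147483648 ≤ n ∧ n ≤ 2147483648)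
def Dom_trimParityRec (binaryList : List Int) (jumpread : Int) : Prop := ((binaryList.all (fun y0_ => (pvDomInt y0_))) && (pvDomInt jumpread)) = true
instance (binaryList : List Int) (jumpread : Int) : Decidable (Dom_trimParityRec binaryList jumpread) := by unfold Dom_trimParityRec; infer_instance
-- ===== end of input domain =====

-- B replaces A's recursive slice-and-concatenate with one linear pass keeping
-- element i exactly when i mod 2*jumpread < jumpread (alternative algorithm, similar cost).


-- ===== PORT A =====
-- fuel = binaryList.length only makes the recursion total; with jumpread ≥ 1 it never runs out
def trimParityRecGo (fuel : Nat) (binaryList : List Int) (jumpread : Int) : List Int :=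
  match fuel with
  | 0 => []
  | fuel + 1 =>
    if binaryList.length = 0 then [] else
      let binaryListA := PySem.List.slice binaryList none (some jumpread)
      let binaryListB := PySem.List.slice binaryList (some (jumpread * 2)) none
      let returnList := binaryListA.foldl (fun acc data => acc ++ [data]) []
      returnList ++ trimParityRecGo fuel binaryListB jumpread

def trimParityRec (binaryList : List Int) (jumpread : Int) : List Int :=
  trimParityRecGo binaryList.length binaryList jumpread

-- ===== PORT B =====
def trimParityRec_alt (binaryList : List Int) (jumpread : Int) : List Int :=
  let period := 2 * jumpread
  (PySem.List.enumerate binaryList 0).filterMap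
    (fun p => if PySem.Int.mod p.1 period < jumpread then some p.2 else none)

-- ===== PRECONDITION & SPEC =====
-- Pre_ excludes jumpread ≤ 0 with a nonempty list, where the Python A recurses forever (RecursionError)
def Pre_trimParityRec (binaryList : List Int) (jumpread : Int) : Prop :=
  binaryList = [] ∨ 1 ≤ jumpread
instance (binaryList : List Int) (jumpread : Int) : Decidable (Pre_trimParityRec binaryList jumpread) := by unfold Pre_trimParityRec; infer_instance
def pvWitness_trimParityRec : List Int × Int := ([1, 0, 1, 0, 1], 1)

def Spec_trimParityRec (binaryList : List Int) (jumpread : Int) (out : List Int) : Prop := out = trimParityRec_alt binaryList jumpread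
instance (binaryList : List Int) (jumpread : Int) (out : List Int) : Decidable (Spec_trimParityRec binaryList jumpread out) := by unfold Spec_trimParityRec; infer_instance

-- ===== CLAIM (what is proved, stated in full; the proofs are below) =====
def Claim_equal_trimParityRec : Prop := ∀ (binaryList : List Int) (jumpread : Int), Dom_trimParityRec binaryList jumpread → Pre_trimParityRec binaryList jumpread → Spec_trimParityRec binaryList jumpread (trimParityRec binaryList jumpread)

-- ===== LEMMAS AND PROOFS =====

theorem foldl_push (xs acc : List Int) :
    xs.foldl (fun a d => a ++ [d]) acc = acc ++ xs := by
  induction xs generalizing acc with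
  | nil => simp
  | cons x xs ih => simp [List.foldl, ih]

-- the keep-condition for an index s with 0 ≤ s < 2j is simply s < j
theorem mod_small (j s : Int) (hj : 1 ≤ j) (h0 : 0 ≤ s) (h1 : s < 2 * j) :
    PySem.Int.mod s (2 * j) = s := by
  rw [PySem.Int.mod_eq_emod_of_pos (by omega : (0:Int) < 2 * j)]
  exact Int.emod_eq_of_lt h0 h1

-- the keep-condition is periodic with period 2j
theorem mod_shift (j s : Int) (hj : 1 ≤ j) :
    PySem.Int.mod (s + 2 * j) (2 * j) = PySem.Int.mod s (2 * j) := by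
  rw [PySem.Int.mod_eq_emod_of_pos (by omega : (0:Int) < 2 * j),
      PySem.Int.mod_eq_emod_of_pos (by omega : (0:Int) < 2 * j)]
  have h : s + 2 * j = s + 2 * j * 1 := by ring
  rw [h, Int.add_mul_emod_self_left]

-- front block: indices s, s+1, … all below 2j keep exactly the first (j-s) elements
theorem front_block (j : Int) (hj : 1 ≤ j) (xs : List Int) :
    ∀ (s : Int), 0 ≤ s → s + xs.length ≤ 2 * j →
      (PySem.List.enumerate xs s).filterMap
        (fun p => if PySem.Int.mod p.1 (2 * j) < j then some p.2 else none)
      = xs.take (j - s).toNat := by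
  induction xs with
  | nil => intro s _ _; simp [PySem.List.enumerate_nil]
  | cons x xs ih =>
    intro s hs hlen
    rw [PySem.List.enumerate_cons, List.filterMap_cons]
    simp only
    rw [mod_small j s hj hs (by simp at hlen; omega)]
    have hrec := ih (s + 1) (by omega) (by simp at hlen ⊢; omega)
    by_cases hlt : s < j
    · simp only [if_pos hlt, hrec]
      have : (j - s).toNat = (j - (s + 1)).toNat + 1 := by omega
      rw [this, List.take_succ_cons]
    · simp only [if_neg hlt, hrec]
      have h1 : (j - s).toNat = 0 := by omega
      have h2 : (j - (s + 1)).toNat = 0 := by omega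
      simp [h1, h2]

-- shifting every index by the period 2j does not change which elements are kept
theorem shift_block (j : Int) (hj : 1 ≤ j) (xs : List Int) :
    ∀ (s : Int),
      (PySem.List.enumerate xs (s + 2 * j)).filterMap
        (fun p => if PySem.Int.mod p.1 (2 * j) < j then some p.2 else none)
      = (PySem.List.enumerate xs s).filterMap
        (fun p => if PySem.Int.mod p.1 (2 * j) < j then some p.2 else none) := by
  induction xs with
  | nil => intro s; simp [PySem.List.enumerate_nil]
  | cons x xs ih =>
    intro s
    rw [PySem.List.enumerate_cons, PySem.List.enumerate_cons,
        List.filterMap_cons, List.filterMap_cons]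
    simp only [mod_shift j s hj]
    have : s + 2 * j + 1 = (s + 1) + 2 * j := by ring
    rw [this, ih (s + 1)]

-- one unfolding step of B matches one recursion step of A
theorem alt_unfold (j : Int) (hj : 1 ≤ j) (l : List Int) :
    trimParityRec_alt l j
      = l.take j.toNat ++ trimParityRec_alt (l.drop (j * 2).toNat) j := by
  unfold trimParityRec_alt
  simp only
  have hsplit : l = l.take (j * 2).toNat ++ l.drop (j * 2).toNat := (List.take_append_drop _ l).symm
  conv_lhs => rw [hsplit]
  rw [PySem.List.enumerate_append, List.filterMap_append]
  congr 1
  · rw [front_block j hj _ 0 le_rfl (by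
      have := List.length_take_le (j * 2).toNat l
      omega)]
    simp only [Int.sub_zero]
    rw [List.take_take]
    congr 1
    omega
  · rcases le_or_gt (j * 2).toNat l.length with hle | hgt
    · generalize l.drop (j * 2).toNat = xs
      have hstart : (0 : Int) + ((l.take (j * 2).toNat).length : Int) = 0 + 2 * j := by
        simp [List.length_take, Nat.min_eq_left hle]
        omega
      rw [hstart, shift_block j hj xs 0]
    · have hdrop : l.drop (j * 2).toNat = [] := List.drop_eq_nil_of_le (by omega)
      rw [hdrop]
      simp [PySem.List.enumerate_nil]

theorem go_eq_alt (j : Int) (hj : 1 ≤ j) :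
    ∀ (n : Nat) (l : List Int), l.length ≤ n → trimParityRecGo n l j = trimParityRec_alt l j := by
  intro n
  induction n with
  | zero =>
    intro l hl
    have : l = [] := List.eq_nil_of_length_eq_zero (by omega)
    subst this
    simp [trimParityRecGo, trimParityRec_alt, PySem.List.enumerate_nil]
  | succ n ih =>
    intro l hl
    unfold trimParityRecGo
    by_cases h0 : l.length = 0
    · have : l = [] := List.eq_nil_of_length_eq_zero h0
      subst this
      simp [trimParityRec_alt, PySem.List.enumerate_nil]
    · simp only [if_neg h0]
      rw [foldl_push, List.nil_append]
      rw [PySem.List.slice_to _ (by omega : (0:Int) ≤ j), PySem.List.slice_from _ (by omega : (0:Int) ≤ j * 2)]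
      rw [ih (l.drop (j * 2).toNat) (by
        have h2 : 2 ≤ (j * 2).toNat := by omega
        simp [List.length_drop]; omega)]
      exact (alt_unfold j hj l).symm

-- ===== VERDICT (by name: the statement is the Claim_ definition above) =====
theorem trimParityRec_spec : Claim_equal_trimParityRec := by
  intro l j _ hpre
  unfold Spec_trimParityRec trimParityRec
  rcases hpre with h | h
  · subst h; simp [trimParityRecGo, trimParityRec_alt, PySem.List.enumerate_nil]
  · exact go_eq_alt j h l.length l le_rfl
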